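-- pv_equiv track=rewrite | github.com/ARGrus90/mics_cases | mbox_pkg/functions/customer_groups.py | groups_by_qnt
-- ===== SOURCE A (Python) =====
-- def count_num(num:int) -> int:
--     '''
--     Функция используется для подсчета суммы цифр
--     целого(int) числа
--     num - исходное число
--     Функция возвращает значение суммы цифр числа num.
--     Если число num не относится к целым(int), то
--     функция возвращает -1.
--     '''
--     if not isinstance(num, int):
--         msg = f'Допустимы только целочисленные значения \n\
--             ("{type(num)}" - было использовано).'
--         raise TypeError(msg)
--     elif num < 0:
--         msg = f'Допустимы только целочисленные ПОЛОЖИТЕЛЬНЫЕ(включая 0) \n\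
--             значения("{num}" - было использовано).'
--         raise ValueError(msg)
--     return sum([int(i) for i in list(str(num))])
--
-- def groups_by_qnt(n_customers:int,n_first_id:int=0) -> dict:
--     '''
--     Функция используется для подсчета числа
--     покупателей, попадающих в каждую из групп
--     [группа - сумма цифр в ID покупателя].
--     На вход функция получает 2 параметра:
--     n_customers - количество покупателей, которые сортируются по группам
--     n_first_id - начальное значение ID покупателя, с которого[включительно]
--                ведется подсчет групп и их значений
--     Функция возвращает словарь: {"группа":"число покупателей в группе"}.
--     Если хоть один из входных параметров не соответствует типу int,
--     то функция возвращает пустой словарь: {};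
--     Если n_first_id отрицательный, а n_customers неположительный, то
--     функция возвращает пустой словарь: {}.
--
--     '''
--     # data type check
--     if not (isinstance(n_customers,int) and isinstance(n_first_id,int)):
--         return {}
--     elif n_customers <= 0 or n_first_id < 0:
--         return {}
--     groups = {}
--     [groups.update({count_num(i):1}) if count_num(i) not in groups.keys()
--      else groups.update({count_num(i):groups[count_num(i)]+1}) \
--     for i in range(n_first_id,n_first_id+n_customers)]
--     return groups
-- ===== SOURCE B (Python) =====
-- def groups_by_qnt(n_customers:int, n_first_id:int=0) -> dict:
--     if not (isinstance(n_customers, int) and isinstance(n_first_id, int)):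
--         return {}
--     if n_customers <= 0 or n_first_id < 0:
--         return {}
--     groups = {}
--     # digit sum of the first ID, computed arithmetically once
--     s, t = 0, n_first_id
--     while t:
--         s += t % 10
--         t //= 10
--     # one pass: record the current digit sum, then update it incrementally
--     # (going from i-1 to i adds 1 and subtracts 9 per trailing zero of i)
--     for i in range(n_first_id + 1, n_first_id + n_customers + 1):
--         groups[s] = groups.get(s, 0) + 1
--         s += 1
--         t = i
--         while t % 10 == 0:
--             s -= 9
--             t //= 10
--     return groups
-- ===== Notes on version B (the rewrite author's own statement) =====
-- stated objective: faster
-- what changed: Instead of converting each ID to a string three times per iteration to recompute its digit sum, B computes the first ID's digit sum arithmetically once and then maintains the digit sum incrementally across the range (+1 per step, -9 per trailing zero of the new ID), counting into the dict with a single get-based update.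
import Mathlib
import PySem

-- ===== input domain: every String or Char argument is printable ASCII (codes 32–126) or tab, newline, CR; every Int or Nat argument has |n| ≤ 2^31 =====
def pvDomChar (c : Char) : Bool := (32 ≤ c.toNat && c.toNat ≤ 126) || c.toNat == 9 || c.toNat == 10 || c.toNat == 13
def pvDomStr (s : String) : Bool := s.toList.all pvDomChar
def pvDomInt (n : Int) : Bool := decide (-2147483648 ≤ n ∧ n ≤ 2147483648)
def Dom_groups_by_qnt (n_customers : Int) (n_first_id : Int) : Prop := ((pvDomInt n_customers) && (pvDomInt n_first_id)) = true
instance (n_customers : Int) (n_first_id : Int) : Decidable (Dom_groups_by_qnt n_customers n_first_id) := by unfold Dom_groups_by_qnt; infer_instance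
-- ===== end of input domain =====

-- B replaces A's three per-ID string-based digit-sum recomputations by one arithmetic digit sum
-- maintained incrementally across the range (constant-factor speed-up measured).

-- ===== PORT A =====
-- count_num: sum([int(i) for i in list(str(num))]); the negative branch raises in Python and is
-- never reached from groups_by_qnt (all IDs are ≥ 0); int(c) is always a digit here, so getD 0 is unreachable.
def count_num (num : Int) : Int :=
  ((PySem.Int.toChars num).map (fun c => (PySem.Int.ofChars? [c]).getD 0)).sum

def groups_by_qnt (n_customers : Int) (n_first_id : Int) : List (Int × Int) :=
  -- isinstance checks are vacuous under the type convention
  if n_customers ≤ 0 || n_first_id < 0 then []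
  else
    ((PySem.List.pyRange n_first_id (n_first_id + n_customers) 1).foldl
      (fun g i =>
        if g.contains (count_num i) = false then g.insert (count_num i) 1
        else g.insert (count_num i) ((g.get? (count_num i)).getD 0 + 1))
      PySem.Dict.empty).items

-- ===== PORT B =====
-- 'while t: s += t % 10; t //= 10' — only ever run with t ≥ 0, ported on t.toNat
def pvDigSum (t : Nat) : Int :=
  if t = 0 then 0 else (t % 10 : Nat) + pvDigSum (t / 10)
decreasing_by exact Nat.div_lt_self (by omega) (by omega)

-- 'while t % 10 == 0: s -= 9; t //= 10' — only ever run with t ≥ 1; the t ≠ 0 conjunct is a totalization guard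
def pvCarry (t : Nat) (s : Int) : Int :=
  if t % 10 = 0 ∧ t ≠ 0 then pvCarry (t / 10) (s - 9) else s
decreasing_by exact Nat.div_lt_self (by omega) (by omega)

def groups_by_qnt_alt (n_customers : Int) (n_first_id : Int) : List (Int × Int) :=
  if n_customers ≤ 0 || n_first_id < 0 then []
  else
    ((PySem.List.pyRange (n_first_id + 1) (n_first_id + n_customers + 1) 1).foldl
      (fun (p : PySem.Dict Int Int × Int) i =>
        (p.1.insert p.2 (p.1.getD p.2 0 + 1), pvCarry i.toNat (p.2 + 1)))
      (PySem.Dict.empty, pvDigSum n_first_id.toNat)).1.items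

-- ===== PRECONDITION & SPEC =====
def Spec_groups_by_qnt (n_customers : Int) (n_first_id : Int) (out : List (Int × Int)) : Prop := out = groups_by_qnt_alt n_customers n_first_id
instance (n_customers : Int) (n_first_id : Int) (out : List (Int × Int)) : Decidable (Spec_groups_by_qnt n_customers n_first_id out) := by unfold Spec_groups_by_qnt; infer_instance

-- ===== CLAIM (what is proved, stated in full; the proofs are below) =====
def Claim_equal_groups_by_qnt : Prop := ∀ (n_customers : Int) (n_first_id : Int), Dom_groups_by_qnt n_customers n_first_id → Spec_groups_by_qnt n_customers n_first_id (groups_by_qnt n_customers n_first_id)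

-- ===== LEMMAS AND PROOFS =====

theorem pvDigSum_ne (t : Nat) (h : t ≠ 0) : pvDigSum t = (t % 10 : Nat) + pvDigSum (t / 10) := by
  rw [pvDigSum]; simp [h]

-- digit characters evaluate back to their value
theorem ofChars_digitChar (d : Nat) (hd : d < 10) :
    (PySem.Int.ofChars? [Nat.digitChar d]).getD 0 = (d : Int) := by
  interval_cases d <;> decide

theorem sum_toDigitsCore (f : Nat) : ∀ (m : Nat) (acc : List Char), m < f →
    ((Nat.toDigitsCore 10 f m acc).map (fun c => (PySem.Int.ofChars? [c]).getD 0)).sum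
      = pvDigSum m + ((acc.map (fun c => (PySem.Int.ofChars? [c]).getD 0)).sum) := by
  induction f with
  | zero => intro m acc h; omega
  | succ f ih =>
    intro m acc h
    rw [Nat.toDigitsCore]
    by_cases h0 : m / 10 = 0
    · simp only [h0, if_true, List.map_cons, List.sum_cons,
        ofChars_digitChar (m % 10) (Nat.mod_lt _ (by omega))]
      by_cases hm : m = 0
      · subst hm; simp [pvDigSum]
      · rw [pvDigSum_ne m hm, h0]; simp [pvDigSum]
    · simp only [h0, if_false]
      rw [ih (m / 10) _ (by omega), pvDigSum_ne m (by omega)]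
      simp only [List.map_cons, List.sum_cons,
        ofChars_digitChar (m % 10) (Nat.mod_lt _ (by omega))]
      ring

-- A's string digit sum equals the arithmetic digit sum, for nonnegative inputs
theorem count_num_eq (i : Int) (hi : 0 ≤ i) : count_num i = pvDigSum i.toNat := by
  unfold count_num PySem.Int.toChars
  rw [if_neg (by omega), Nat.toDigits]
  rw [sum_toDigitsCore (i.toNat + 1) i.toNat [] (by omega)]
  simp

-- the incremental update: from digitsum(m-1) to digitsum(m)
theorem pvCarry_step : ∀ (m : Nat), 1 ≤ m → pvCarry m (pvDigSum (m - 1) + 1) = pvDigSum m := by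
  intro m
  induction m using Nat.strong_induction_on with
  | _ m ih =>
    intro hm
    by_cases h0 : m % 10 = 0
    · have h10 : 10 ≤ m := by omega
      rw [pvCarry]
      simp only [h0, true_and, if_pos (by omega : m ≠ 0)]
      have e1 : (m - 1) % 10 = 9 := by omega
      have e2 : (m - 1) / 10 = m / 10 - 1 := by omega
      have e3 : pvDigSum (m - 1) + 1 - 9 = pvDigSum (m / 10 - 1) + 1 := by
        rw [pvDigSum_ne (m - 1) (by omega), e1, e2]; push_cast; ring
      rw [e3, ih (m / 10) (by omega) (by omega), pvDigSum_ne m (by omega), h0]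
      simp
    · rw [pvCarry]
      simp only [h0, false_and, if_false]
      rw [pvDigSum_ne m (by omega)]
      by_cases h1 : m = 1
      · subst h1; simp [pvDigSum]
      · rw [pvDigSum_ne (m - 1) (by omega)]
        have e1 : (m - 1) % 10 = m % 10 - 1 := by omega
        have e2 : (m - 1) / 10 = m / 10 := by omega
        rw [e1, e2]
        have : (1:Nat) ≤ m % 10 := by omega
        push_cast ; omega

-- A's conditional update collapses to B's get-based update
theorem update_collapse (g : PySem.Dict Int Int) (k : Int) :
    (if g.contains k = false then g.insert k 1
     else g.insert k ((g.get? k).getD 0 + 1)) = g.insert k (g.getD k 0 + 1) := by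
  by_cases h : g.contains k
  · simp [h, PySem.Dict.getD]
  · have hn : g.get? k = none := by
      cases hg : g.get? k with
      | none => rfl
      | some v => exact absurd (by simp [PySem.Dict.contains_eq_isSome_get?, hg]) h
    simp [h, PySem.Dict.getD, hn]

-- main loop invariant: A's fold over [a, a+k) equals B's fold over [a+1, a+k+1) carrying the digit sum
theorem fold_eq (k : Nat) : ∀ (a : Int), 0 ≤ a → ∀ (g : PySem.Dict Int Int),
    (PySem.List.pyRange a (a + k) 1).foldl
      (fun g i =>
        if g.contains (count_num i) = false then g.insert (count_num i) 1
        else g.insert (count_num i) ((g.get? (count_num i)).getD 0 + 1)) g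
    = ((PySem.List.pyRange (a + 1) (a + k + 1) 1).foldl
        (fun (p : PySem.Dict Int Int × Int) i =>
          (p.1.insert p.2 (p.1.getD p.2 0 + 1), pvCarry i.toNat (p.2 + 1)))
        (g, pvDigSum a.toNat)).1 := by
  induction k with
  | zero =>
    intro a ha g
    rw [PySem.List.pyRange_one_eq_nil (by omega), PySem.List.pyRange_one_eq_nil (by omega)]
    rfl
  | succ k ih =>
    intro a ha g
    rw [PySem.List.pyRange_one_cons (by omega : a < a + (k + 1 : Nat)),
        PySem.List.pyRange_one_cons (by omega : a + 1 < a + (k + 1 : Nat) + 1)]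
    simp only [List.foldl_cons]
    have hs : pvCarry (a + 1).toNat (pvDigSum a.toNat + 1) = pvDigSum (a + 1).toNat := by
      have e : (a + 1).toNat - 1 = a.toNat := by omega
      have := pvCarry_step (a + 1).toNat (by omega)
      rwa [e] at this
    rw [count_num_eq a ha, update_collapse, hs]
    have e1 : a + (k + 1 : Nat) = (a + 1) + k := by push_cast; ring
    rw [e1]
    exact ih (a + 1) (by omega) _

-- ===== VERDICT (by name: the statement is the Claim_ definition above) =====
theorem groups_by_qnt_spec : Claim_equal_groups_by_qnt := by
  intro n a _
  unfold Spec_groups_by_qnt groups_by_qnt groups_by_qnt_alt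
  by_cases h : n ≤ 0 || a < 0
  · simp [h]
  · simp only [h, Bool.false_eq_true, if_false]
    have hn : 0 < n := by simp only [Bool.or_eq_true, decide_eq_true_eq] at h; omega
    have ha : 0 ≤ a := by simp only [Bool.or_eq_true, decide_eq_true_eq] at h; omega
    have e : a + n = a + (n.toNat : Nat) := by omega
    rw [e, fold_eq n.toNat a ha PySem.Dict.empty]
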